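-- pv_equiv track=rewrite | github.com/bashbash96/InterviewPreparation | LeetCode/googlePhone.py | validateCoins
-- ===== SOURCE A (Python) =====
-- def validateCoins(coins, k):
--     i = 0
--     while i < len(coins):
--         currCoin = coins[i]
--         counter = 0
--         while i < len(coins) and coins[i] == currCoin:
--             i += 1
--             counter += 1
--         if counter > k:
--             return False
--
--     return True
-- ===== SOURCE B (Python) =====
-- def validateCoins(coins, k):
--     prev = None
--     run = 0
--     for c in coins:
--         run = run + 1 if prev is not None and c == prev else 1
--         if run > k:
--             return False
--         prev = c
--     return True
-- ===== Notes on version B (the rewrite author's own statement) =====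
-- stated objective: simpler
-- what changed: Replaced the nested index-based while loops (inner loop measuring each full run before checking) by a single pass that maintains a running run-length counter against the previous element and fails as soon as it exceeds k.
import Mathlib
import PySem

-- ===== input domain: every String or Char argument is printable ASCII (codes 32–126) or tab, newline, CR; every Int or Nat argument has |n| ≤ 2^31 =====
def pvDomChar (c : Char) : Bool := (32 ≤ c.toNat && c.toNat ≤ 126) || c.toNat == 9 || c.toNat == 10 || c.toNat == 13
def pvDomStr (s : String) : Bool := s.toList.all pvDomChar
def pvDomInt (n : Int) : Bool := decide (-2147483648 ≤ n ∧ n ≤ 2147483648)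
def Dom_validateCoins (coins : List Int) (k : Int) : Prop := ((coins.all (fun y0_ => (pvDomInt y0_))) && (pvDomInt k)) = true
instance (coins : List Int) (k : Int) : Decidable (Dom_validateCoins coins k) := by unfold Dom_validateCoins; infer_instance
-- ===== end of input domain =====

-- B replaces A's nested index-based while loops by a single pass with a running
-- run-length counter (objective: simpler).

-- ===== PORT A =====
-- inner while loop: 'while i < len(coins) and coins[i] == currCoin: i += 1; counter += 1'
def innerA (coins : List Int) (curr : Int) (i : Nat) (counter : Int) : Nat × Int :=
  if h : i < coins.length ∧ coins[i]? = some curr then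
    innerA coins curr (i + 1) (counter + 1)
  else
    (i, counter)
termination_by coins.length - i
decreasing_by omega

-- characterisation of the inner loop, needed for the outer loop's termination
theorem innerA_eq (coins : List Int) (curr : Int) :
    ∀ (n i : Nat) (counter : Int), coins.length - i = n →
      innerA coins curr i counter =
        (i + ((coins.drop i).takeWhile (fun x => x == curr)).length,
         counter + (((coins.drop i).takeWhile (fun x => x == curr)).length : Int)) := by
  intro n
  induction n with
  | zero =>
    intro i counter h
    rw [innerA]
    have hge : coins.length ≤ i := by omega
    have hdrop : coins.drop i = [] := List.drop_eq_nil_of_le hge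
    rw [dif_neg (by omega), hdrop]
    simp
  | succ n ih =>
    intro i counter h
    rw [innerA]
    by_cases hc : i < coins.length ∧ coins[i]? = some curr
    · rw [dif_pos hc]
      rw [ih (i + 1) (counter + 1) (by omega)]
      have hi : i < coins.length := hc.1
      have hcur : coins[i] = curr := by
        have := hc.2
        rw [List.getElem?_eq_some_iff] at this
        exact this.2
      have hd : coins.drop i = coins[i] :: coins.drop (i + 1) :=
        List.drop_eq_getElem_cons hi
      rw [hd, hcur, List.takeWhile_cons]
      simp only [beq_self_eq_true, if_true, List.length_cons]
      rw [Prod.mk.injEq]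
      constructor
      · omega
      · push_cast; ring
    · rw [dif_neg hc]
      by_cases hi : i < coins.length
      · have hcur : ¬ coins[i]? = some curr := fun hx => hc ⟨hi, hx⟩
        have hd : coins.drop i = coins[i] :: coins.drop (i + 1) :=
          List.drop_eq_getElem_cons hi
        have hne : (coins[i] == curr) = false := by
          rcases hbe : (coins[i] == curr) with _ | _
          · rfl
          · exact absurd (by rw [List.getElem?_eq_some_iff]; exact ⟨hi, eq_of_beq hbe⟩) hcur
        rw [hd, List.takeWhile_cons, hne]
        simp
      · have hdrop : coins.drop i = [] := List.drop_eq_nil_of_le (by omega)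
        rw [hdrop]
        simp

theorem innerA_fst_lt (coins : List Int) (i : Nat) (h : i < coins.length) :
    i < (innerA coins coins[i] i 0).1 := by
  rw [innerA_eq coins coins[i] (coins.length - i) i 0 rfl]
  have hd : coins.drop i = coins[i] :: coins.drop (i + 1) :=
    List.drop_eq_getElem_cons h
  rw [hd, List.takeWhile_cons]
  simp

-- outer while loop over the index i
def outerA (coins : List Int) (k : Int) (i : Nat) : Bool :=
  if h : i < coins.length then
    let p := innerA coins coins[i] i 0
    if p.2 > k then false
    else outerA coins k p.1
  else
    true
termination_by coins.length - i
decreasing_by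
  have := innerA_fst_lt coins i h
  omega

def validateCoins (coins : List Int) (k : Int) : Bool :=
  outerA coins k 0

-- ===== PORT B =====
-- the single 'for c in coins' pass with state (prev, run) and early False
def bLoop (k : Int) : List Int → Option Int → Int → Bool
  | [], _, _ => true
  | c :: rest, prev, run =>
    let run' := if prev == some c then run + 1 else 1
    if run' > k then false else bLoop k rest (some c) run'

def validateCoins_alt (coins : List Int) (k : Int) : Bool :=
  bLoop k coins none 0

-- ===== PRECONDITION & SPEC =====
def Spec_validateCoins (coins : List Int) (k : Int) (out : Bool) : Prop := out = validateCoins_alt coins k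
instance (coins : List Int) (k : Int) (out : Bool) : Decidable (Spec_validateCoins coins k out) := by unfold Spec_validateCoins; infer_instance

-- ===== CLAIM (what is proved, stated in full; the proofs are below) =====
def Claim_equal_validateCoins : Prop := ∀ (coins : List Int) (k : Int), Dom_validateCoins coins k → Spec_validateCoins coins k (validateCoins coins k)

-- ===== LEMMAS AND PROOFS =====

theorem drop_takeWhile_len {α : Type} (p : α → Bool) :
    ∀ l : List α, l.drop (l.takeWhile p).length = l.dropWhile p
  | [] => rfl
  | a :: l => by
    by_cases h : p a
    · simp [List.takeWhile_cons, List.dropWhile_cons, h, drop_takeWhile_len p l]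
    · simp [List.takeWhile_cons, List.dropWhile_cons, h]

theorem head?_dropWhile_false {α : Type} (p : α → Bool) :
    ∀ (l : List α) (x : α), (l.dropWhile p).head? = some x → p x = false
  | [], x, hx => by simp at hx
  | a :: l, x, hx => by
    by_cases h : p a
    · rw [List.dropWhile_cons, if_pos h] at hx
      exact head?_dropWhile_false p l x hx
    · rw [List.dropWhile_cons, if_neg h] at hx
      simp only [List.head?_cons, Option.some.injEq] at hx
      subst hx
      simpa using h

theorem bLoop_run (k c : Int) :
    ∀ (l : List Int) (r : Int), r ≤ k →
      bLoop k l (some c) r =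
        (if r + ((l.takeWhile (fun x => x == c)).length : Int) > k then false
         else bLoop k (l.dropWhile (fun x => x == c)) (some c)
                (r + ((l.takeWhile (fun x => x == c)).length : Int)))
  | [], r, hr => by
    simp only [List.takeWhile_nil, List.dropWhile_nil, List.length_nil, Int.natCast_zero,
      add_zero]
    rw [if_neg (by omega)]
  | x :: l, r, hr => by
    by_cases hx : (x == c) = true
    · have hxc : x = c := eq_of_beq hx
      rw [List.takeWhile_cons, List.dropWhile_cons, if_pos hx, if_pos hx]
      show (if (if (some c == some x) then r + 1 else 1) > k then false
            else bLoop k l (some x) (if (some c == some x) then r + 1 else 1)) = _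
      have hbeq : (some c == some x) = true := by simp [hxc]
      rw [hbeq]
      simp only [if_true, List.length_cons]
      by_cases hk : r + 1 > k
      · rw [if_pos hk, if_pos (by push_cast; omega)]
      · rw [if_neg hk, hxc]
        rw [bLoop_run k c l (r + 1) (by omega)]
        have harith : r + 1 + ((l.takeWhile (fun x => x == c)).length : Int)
            = r + (((l.takeWhile (fun x => x == c)).length : Nat) + 1 : Nat) := by
          push_cast; ring
        rw [harith]
    · have hx' : (x == c) = false := by simpa using hx
      rw [List.takeWhile_cons, List.dropWhile_cons, hx']
      simp only [Bool.false_eq_true, if_false, List.length_nil, Int.natCast_zero, add_zero]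
      rw [if_neg (by omega)]

theorem outerA_eq_bLoop (coins : List Int) (k : Int) :
    ∀ (n i : Nat) (p : Option Int) (r : Int), coins.length - i ≤ n →
      (∀ x, (coins.drop i).head? = some x → (p == some x) = false) →
      outerA coins k i = bLoop k (coins.drop i) p r := by
  intro n
  induction n with
  | zero =>
    intro i p r hn _
    have hdrop : coins.drop i = [] := List.drop_eq_nil_of_le (by omega)
    rw [outerA, dif_neg (by omega), hdrop]
    rfl
  | succ n ih =>
    intro i p r hn hp
    rw [outerA]
    by_cases h : i < coins.length
    · rw [dif_pos h]
      have hinner := innerA_eq coins coins[i] (coins.length - i) i 0 rfl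
      have hd : coins.drop i = coins[i] :: coins.drop (i + 1) :=
        List.drop_eq_getElem_cons h
      set T := ((coins.drop i).takeWhile (fun x => x == coins[i])).length with hT
      have hT1 : 1 ≤ T := by
        rw [hT, hd, List.takeWhile_cons]; simp
      have hT2 : T = ((coins.drop (i + 1)).takeWhile (fun x => x == coins[i])).length + 1 := by
        rw [hT, hd, List.takeWhile_cons]; simp
      simp only [hinner, zero_add]
      -- right-hand side: first element of the run resets run' to 1
      have hpc : (p == some coins[i]) = false := hp coins[i] (by rw [hd]; rfl)
      conv_rhs => rw [hd]
      show _ = (if (if (p == some coins[i]) then r + 1 else 1) > k then false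
                else bLoop k (coins.drop (i + 1)) (some coins[i])
                      (if (p == some coins[i]) then r + 1 else 1))
      rw [hpc]
      simp only [Bool.false_eq_true, if_false]
      by_cases hk1 : (1 : Int) > k
      · rw [if_pos hk1, if_pos (by omega)]
      · rw [if_neg hk1]
        rw [bLoop_run k coins[i] (coins.drop (i + 1)) 1 (by omega)]
        have harith : (1 : Int) + (((coins.drop (i + 1)).takeWhile (fun x => x == coins[i])).length : Int)
            = (T : Int) := by rw [hT2]; push_cast; ring
        rw [harith]
        by_cases hTk : (T : Int) > k
        · rw [if_pos hTk, if_pos hTk]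
        · rw [if_neg hTk, if_neg hTk]
          have hdw : (coins.drop (i + 1)).dropWhile (fun x => x == coins[i])
              = coins.drop (i + T) := by
            have h1 : (coins.drop i).dropWhile (fun x => x == coins[i])
                = (coins.drop (i + 1)).dropWhile (fun x => x == coins[i]) := by
              rw [hd, List.dropWhile_cons, if_pos (by simp)]
            rw [← h1, ← drop_takeWhile_len (fun x => x == coins[i]) (coins.drop i), ← hT,
              List.drop_drop]
          rw [hdw]
          exact ih (i + T) (some coins[i]) (T : Int) (by omega)
            (by
              intro x hx
              rw [← hdw] at hx
              have hfx := head?_dropWhile_false (fun y => y == coins[i]) _ x hx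
              rw [beq_eq_false_iff_ne] at hfx
              rw [beq_eq_false_iff_ne]
              simp only [Ne, Option.some.injEq]
              exact fun hcontra => hfx hcontra.symm)
    · rw [dif_neg h]
      have hdrop : coins.drop i = [] := List.drop_eq_nil_of_le (by omega)
      rw [hdrop]
      rfl

-- ===== VERDICT (by name: the statement is the Claim_ definition above) =====
theorem validateCoins_spec : Claim_equal_validateCoins := by
  intro coins k _
  unfold Spec_validateCoins validateCoins validateCoins_alt
  have := outerA_eq_bLoop coins k coins.length 0 none 0 (by omega)
    (by intro x _; rfl)
  simpa using this
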